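-- pv_equiv track=rewrite | github.com/jon-chun/ancient-greek-nlp | src/step1c_segment_document_ver1.py | agglomerate_chunks
-- ===== SOURCE A (Python) =====
-- def agglomerate_chunks(chunks, min_chars):
--     """
--     Agglomerate small chunks until all chunks are at least min_chars in length.
--     Makes multiple passes to ensure minimum chunk size is achieved where possible.
--     """
--     # Create a copy to work with
--     result = chunks.copy()
--
--     # Continue until all chunks are at least min_chars in length or we can't merge any more
--     made_changes = True
--     while made_changes and len(result) > 1:
--         made_changes = False
--
--         # If all chunks are above minimum size, we're done
--         if all(len(chunk) >= min_chars for chunk in result):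
--             break
--
--         # Find the smallest chunk
--         sizes = [len(chunk) for chunk in result]
--         smallest_idx = sizes.index(min(sizes))
--
--         # If the smallest chunk is already large enough, we're done
--         if sizes[smallest_idx] >= min_chars:
--             break
--
--         # Determine whether to merge with the previous or next chunk
--         if smallest_idx == 0:  # First chunk
--             # Merge with the next chunk
--             result[0] = result[0] + "\n\n" + result[1]
--             result.pop(1)
--             made_changes = True
--         elif smallest_idx == len(result) - 1:  # Last chunk
--             # Merge with the previous chunk
--             result[smallest_idx - 1] = result[smallest_idx - 1] + "\n\n" + result[smallest_idx]
--             result.pop(smallest_idx)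
--             made_changes = True
--         else:
--             # Compare sizes of adjacent chunks and merge with the smaller one
--             prev_size = sizes[smallest_idx - 1]
--             next_size = sizes[smallest_idx + 1]
--
--             if prev_size <= next_size:
--                 # Merge with the previous chunk
--                 result[smallest_idx - 1] = result[smallest_idx - 1] + "\n\n" + result[smallest_idx]
--                 result.pop(smallest_idx)
--             else:
--                 # Merge with the next chunk
--                 result[smallest_idx] = result[smallest_idx] + "\n\n" + result[smallest_idx + 1]
--                 result.pop(smallest_idx + 1)
--
--             made_changes = True
--
--     return result
-- ===== SOURCE B (Python) =====
-- def _push(agenda, entry):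
--     # insert into a descending-sorted agenda (binary search, one splice)
--     lo, hi = 0, len(agenda)
--     while lo < hi:
--         mid = (lo + hi) // 2
--         if agenda[mid] > entry:
--             lo = mid + 1
--         else:
--             hi = mid
--     agenda.insert(lo, entry)
--
-- def agglomerate_chunks(chunks, min_chars):
--     """
--     Priority agenda + doubly linked list with lazy deletion: (size, id) entries
--     sit in an agenda kept sorted descending, so the current smallest chunk pops
--     off the end in O(1) instead of being rescanned; merges splice the linked
--     list in O(1) and push one refreshed entry; stale entries are skipped.
--     """
--     n = len(chunks)
--     if n <= 1:
--         return chunks.copy()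
--     sizes = [len(c) for c in chunks]
--     texts = chunks.copy()
--     prev = [i - 1 if i > 0 else None for i in range(n)]
--     nxt = [i + 1 if i < n - 1 else None for i in range(n)]
--     alive = [True] * n
--     agenda = []  # descending by (size, id); smallest entry at the end
--     for i in range(n):
--         _push(agenda, (sizes[i], i))
--     count = n
--     while count > 1:
--         s, j = agenda.pop()
--         if not alive[j] or s != sizes[j]:
--             continue  # stale entry (lazy deletion)
--         if s >= min_chars:
--             break
--         p, q = prev[j], nxt[j]
--         if p is None:
--             a = j
--         elif q is None:
--             a = p
--         elif sizes[p] <= sizes[q]: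
--             a = p
--         else:
--             a = j
--         b = nxt[a]
--         sizes[a] += 2 + sizes[b]
--         texts[a] = texts[a] + "\n\n" + texts[b]
--         alive[b] = False
--         nxt[a] = nxt[b]
--         if nxt[b] is not None:
--             prev[nxt[b]] = a
--         count -= 1
--         _push(agenda, (sizes[a], a))
--     return [texts[i] for i in range(n) if alive[i]]
-- ===== Notes on version B (the rewrite author's own statement) =====
-- stated objective: faster
-- what changed: B replaces A's per-pass rescans (rebuild sizes, all(), min(), index(), list.pop at an arbitrary index) with a priority agenda of (size, id) entries kept sorted descending with binary-search insertion and lazy deletion of stale entries, plus a doubly linked list over chunk ids so each merge and neighbor lookup is O(1) pointer splicing; texts are indexed by id and the surviving ones are collected once at the end.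
import Mathlib
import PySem

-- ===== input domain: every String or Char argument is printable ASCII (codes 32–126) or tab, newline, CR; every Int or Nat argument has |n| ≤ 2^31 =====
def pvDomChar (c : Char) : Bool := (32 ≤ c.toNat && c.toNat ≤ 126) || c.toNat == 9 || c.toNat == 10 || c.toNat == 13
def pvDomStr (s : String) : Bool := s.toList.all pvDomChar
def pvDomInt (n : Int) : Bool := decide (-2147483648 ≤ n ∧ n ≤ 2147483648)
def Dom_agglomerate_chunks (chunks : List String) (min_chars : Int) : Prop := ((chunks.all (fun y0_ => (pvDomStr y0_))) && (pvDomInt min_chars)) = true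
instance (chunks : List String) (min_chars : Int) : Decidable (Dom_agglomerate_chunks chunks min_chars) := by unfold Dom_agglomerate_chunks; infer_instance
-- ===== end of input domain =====

-- B replaces A's per-pass rescans with a descending-sorted (size, id) agenda (binary-search
-- insertion, lazy deletion of stale entries) and a doubly linked list over chunk ids for O(1)
-- merges; measured faster (constant factor). Return value only: neither version mutates its input.

-- ===== PORT A =====
-- result.pop(i): Python returns the element and shrinks the list; A discards the element.
-- none is unreachable here (A only pops in-range indices), identity is a formal fallback.
def pyPopAt {α : Type} (xs : List α) (i : Int) : List α :=
  match PySem.List.pop? xs i with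
  | some r => r.2
  | none => xs

def aggLoopA (fuel : Nat) (min_chars : Int) (result : List String) : List String :=
  match fuel with
  | 0 => result
  | fuel + 1 =>
    -- while made_changes and len(result) > 1  (every non-break iteration merges, so the loop
    -- runs until a break or len <= 1; fuel = initial length bounds the number of merges)
    if result.length ≤ 1 then result
    else if result.all (fun chunk => decide (min_chars ≤ PySem.Str.len chunk)) then result
    else
      let sizes := result.map PySem.Str.len
      let m := (PySem.List.min? sizes (fun x => x)).getD 0
      let smallest_idx : Nat := (PySem.List.index? sizes m).getD 0
      if min_chars ≤ PySem.List.pyGetD sizes (smallest_idx : Int) 0 then result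
      else
        let result' :=
          if smallest_idx = 0 then
            pyPopAt (PySem.List.pySetD result 0
              (PySem.List.pyGetD result 0 "" ++ "\n\n" ++ PySem.List.pyGetD result 1 "")) 1
          else if smallest_idx = result.length - 1 then
            pyPopAt (PySem.List.pySetD result ((smallest_idx : Int) - 1)
              (PySem.List.pyGetD result ((smallest_idx : Int) - 1) "" ++ "\n\n" ++
               PySem.List.pyGetD result (smallest_idx : Int) "")) (smallest_idx : Int)
          else
            let prev_size := PySem.List.pyGetD sizes ((smallest_idx : Int) - 1) 0
            let next_size := PySem.List.pyGetD sizes ((smallest_idx : Int) + 1) 0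
            if prev_size ≤ next_size then
              pyPopAt (PySem.List.pySetD result ((smallest_idx : Int) - 1)
                (PySem.List.pyGetD result ((smallest_idx : Int) - 1) "" ++ "\n\n" ++
                 PySem.List.pyGetD result (smallest_idx : Int) "")) (smallest_idx : Int)
            else
              pyPopAt (PySem.List.pySetD result (smallest_idx : Int)
                (PySem.List.pyGetD result (smallest_idx : Int) "" ++ "\n\n" ++
                 PySem.List.pyGetD result ((smallest_idx : Int) + 1) "")) ((smallest_idx : Int) + 1)
        aggLoopA fuel min_chars result'

def agglomerate_chunks (chunks : List String) (min_chars : Int) : List String :=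
  aggLoopA chunks.length min_chars chunks

-- ===== PORT B =====
-- Python's '>' on (int, int) tuples: lexicographic
def entGT (a b : Int × Int) : Bool := decide (b.1 < a.1) || (a.1 == b.1 && decide (b.2 < a.2))

-- _push's 'while lo < hi' binary search for the insertion point
def pushLoop (agenda : List (Int × Int)) (entry : Int × Int) (lo hi : Nat) : Nat :=
  if h : lo < hi then
    let mid := (lo + hi) / 2
    if entGT (agenda.getD mid (0, 0)) entry then pushLoop agenda entry (mid + 1) hi
    else pushLoop agenda entry lo mid
  else lo
termination_by hi - lo
decreasing_by all_goals omega

def pushB (agenda : List (Int × Int)) (entry : Int × Int) : List (Int × Int) :=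
  PySem.List.insert agenda ((pushLoop agenda entry 0 agenda.length : Nat) : Int) entry

-- the while loop; each iteration pops exactly one agenda entry ('continue' included)
def aggLoopB (fuel : Nat) (min_chars : Int)
    (sizes : List Int) (texts : List String) (prev nxt : List (Option Int))
    (alive : List Bool) (agenda : List (Int × Int)) (count : Int) :
    List Bool × List String :=
  match fuel with
  | 0 => (alive, texts)
  | fuel + 1 =>
    if count ≤ 1 then (alive, texts)
    else
      match PySem.List.pop? agenda (-1) with
      | none => (alive, texts)  -- unreachable: the agenda is nonempty while count > 1
      | some ((s, j), agenda') =>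
        if ¬ (PySem.List.pyGetD alive j false = true) ∨ ¬ (s = PySem.List.pyGetD sizes j 0) then
          aggLoopB fuel min_chars sizes texts prev nxt alive agenda' count  -- stale, continue
        else if min_chars ≤ s then (alive, texts)  -- break
        else
          let p := PySem.List.pyGetD prev j none
          let q := PySem.List.pyGetD nxt j none
          let a : Int :=
            match p, q with
            | none, _ => j
            | some pv, none => pv
            | some pv, some qv =>
              if PySem.List.pyGetD sizes pv 0 ≤ PySem.List.pyGetD sizes qv 0 then pv else j
          match PySem.List.pyGetD nxt a none with
          | none => (alive, texts)  -- unreachable: the chosen left chunk always has a successor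
          | some b =>
            let sizes' := PySem.List.pySetD sizes a
              (PySem.List.pyGetD sizes a 0 + (2 + PySem.List.pyGetD sizes b 0))
            let texts' := PySem.List.pySetD texts a
              (PySem.List.pyGetD texts a "" ++ "\n\n" ++ PySem.List.pyGetD texts b "")
            let alive' := PySem.List.pySetD alive b false
            let nxt' := PySem.List.pySetD nxt a (PySem.List.pyGetD nxt b none)
            let prev' :=
              match PySem.List.pyGetD nxt' b none with
              | some c => PySem.List.pySetD prev c (some a)
              | none => prev
            aggLoopB fuel min_chars sizes' texts' prev' nxt' alive'
              (pushB agenda' (PySem.List.pyGetD sizes' a 0, a)) (count - 1)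

def agglomerate_chunks_alt (chunks : List String) (min_chars : Int) : List String :=
  let n := chunks.length
  if n ≤ 1 then chunks
  else
    let sizes := chunks.map PySem.Str.len
    let texts := chunks
    let prev := (List.range n).map (fun i : Nat => if 0 < i then some ((i : Int) - 1) else none)
    let nxt := (List.range n).map (fun i => if i < n - 1 then some ((i : Int) + 1) else none)
    let alive := List.replicate n true
    let agenda := (List.range n).foldl
      (fun ag (i : Nat) => pushB ag (PySem.List.pyGetD sizes (i : Int) 0, (i : Int))) []
    -- each iteration pops one entry; at most n initial entries plus one push per merge,
    -- so 3*n iterations bound the while loop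
    let r := aggLoopB (3 * n) min_chars sizes texts prev nxt alive agenda (n : Int)
    ((List.range n).filter (fun i : Nat => PySem.List.pyGetD r.1 (i : Int) false)).map
      (fun i : Nat => PySem.List.pyGetD r.2 (i : Int) "")

-- ===== PRECONDITION & SPEC =====
def Spec_agglomerate_chunks (chunks : List String) (min_chars : Int) (out : List String) : Prop := out = agglomerate_chunks_alt chunks min_chars
instance (chunks : List String) (min_chars : Int) (out : List String) : Decidable (Spec_agglomerate_chunks chunks min_chars out) := by unfold Spec_agglomerate_chunks; infer_instance

-- ===== CLAIM (what is proved, stated in full; the proofs are below) =====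
def Claim_equal_agglomerate_chunks : Prop := ∀ (chunks : List String) (min_chars : Int), Dom_agglomerate_chunks chunks min_chars → Spec_agglomerate_chunks chunks min_chars (agglomerate_chunks chunks min_chars)

-- ===== LEMMAS AND PROOFS =====

-- lexicographic ≤ on entries; entGT is its strict complement
def eLE (a b : Int × Int) : Prop := a.1 < b.1 ∨ (a.1 = b.1 ∧ a.2 ≤ b.2)

theorem entGT_iff (x y : Int × Int) : entGT x y = true ↔ ¬ eLE x y := by
  simp [entGT, eLE]; omega

-- agenda invariant: sorted descending (earlier entries ≥ later ones)
def Desc (ag : List (Int × Int)) : Prop := ag.Pairwise (fun x y => eLE y x)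

-- leftmost argmin of a list under an Int key, with its index
def fargmin {α : Type} (f : α → Int) : List α → Option (Nat × α)
  | [] => none
  | x :: xs =>
    match fargmin f xs with
    | none => some (0, x)
    | some (j, y) => if f y < f x then some (j + 1, y) else some (0, x)

-- the doubly linked list over alive ids, head pointer p
def Linked (prev nxt : List (Option Int)) (p : Option Int) : List Nat → Prop
  | [] => True
  | a :: t => prev.getD a none = p ∧ nxt.getD a none = t.head?.map (fun b => ((b : Nat) : Int))
      ∧ Linked prev nxt (some (a : Int)) t

def idsOf (n : Nat) (alive : List Bool) : List Nat :=
  (List.range n).filter (fun i => alive.getD i false)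

def absOf (n : Nat) (alive : List Bool) (texts : List String) : List String :=
  (idsOf n alive).map (fun i => texts.getD i "")

-- one A-merge, expressed on the plain chunk list
def mergeAt (xs : List String) (k : Nat) : List String :=
  xs.take k ++ (xs.getD k "" ++ "\n\n" ++ xs.getD (k + 1) "") :: xs.drop (k + 2)

def chooseK (xs : List String) (j : Nat) : Nat :=
  if j = 0 then 0
  else if j = xs.length - 1 then j - 1
  else if PySem.Str.len (xs.getD (j - 1) "") ≤ PySem.Str.len (xs.getD (j + 1) "") then j - 1
  else j

-- the common mathematical form of the greedy process
def idealLoop (fuel : Nat) (mc : Int) (xs : List String) : List String :=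
  match fuel with
  | 0 => xs
  | fuel + 1 =>
    if xs.length ≤ 1 then xs
    else
      match fargmin PySem.Str.len xs with
      | none => xs
      | some (j, c) =>
        if mc ≤ PySem.Str.len c then xs
        else idealLoop fuel mc (mergeAt xs (chooseK xs j))

-- full simulation invariant for B's state
def InvB (n : Nat) (sizes : List Int) (texts : List String) (prev nxt : List (Option Int))
    (alive : List Bool) (agenda : List (Int × Int)) (count : Int) : Prop :=
  sizes.length = n ∧ texts.length = n ∧ prev.length = n ∧ nxt.length = n ∧ alive.length = n ∧
  count = ((idsOf n alive).length : Int) ∧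
  (∀ i ∈ idsOf n alive, sizes.getD i 0 = PySem.Str.len (texts.getD i "")) ∧
  Linked prev nxt none (idsOf n alive) ∧
  Desc agenda ∧
  (∀ i ∈ idsOf n alive, (sizes.getD i 0, ((i : Nat) : Int)) ∈ agenda) ∧
  (∀ e ∈ agenda, ∃ i : Nat, e.2 = (i : Int) ∧ i < n)


theorem fargmin_eq_none_iff {α : Type} (f : α → Int) (xs : List α) :
    fargmin f xs = none ↔ xs = [] := by
  cases xs with
  | nil => simp [fargmin]
  | cons x xs =>
    simp only [fargmin]
    cases fargmin f xs with
    | none => simp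
    | some p => obtain ⟨j, y⟩ := p; by_cases h : f y < f x <;> simp [h]

theorem fargmin_getElem {α : Type} (f : α → Int) (xs : List α) (j : Nat) (y : α)
    (h : fargmin f xs = some (j, y)) : ∃ hj : j < xs.length, xs[j] = y := by
  induction xs generalizing j y with
  | nil => simp [fargmin] at h
  | cons x xs ih =>
    simp only [fargmin] at h
    cases hx : fargmin f xs with
    | none =>
      rw [hx] at h; simp at h
      obtain ⟨rfl, rfl⟩ := h; exact ⟨by simp, by simp⟩
    | some p =>
      obtain ⟨j', y'⟩ := p
      rw [hx] at h
      by_cases hc : f y' < f x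
      · simp [hc] at h
        obtain ⟨rfl, rfl⟩ := h
        obtain ⟨hj, he⟩ := ih _ _ hx
        exact ⟨by simpa using hj, by simpa using he⟩
      · simp [hc] at h
        obtain ⟨rfl, rfl⟩ := h; exact ⟨by simp, by simp⟩

theorem fargmin_isMin {α : Type} (f : α → Int) (xs : List α) (j : Nat) (y : α)
    (h : fargmin f xs = some (j, y)) : ∀ z ∈ xs, f y ≤ f z := by
  induction xs generalizing j y with
  | nil => simp [fargmin] at h
  | cons x xs ih =>
    simp only [fargmin] at h
    cases hx : fargmin f xs with
    | none =>
      rw [hx] at h; simp at h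
      obtain ⟨rfl, rfl⟩ := h
      rw [fargmin_eq_none_iff] at hx; subst hx
      simp
    | some p =>
      obtain ⟨j', y'⟩ := p
      rw [hx] at h
      by_cases hc : f y' < f x
      · simp [hc] at h
        obtain ⟨rfl, rfl⟩ := h
        intro z hz
        rcases List.mem_cons.mp hz with rfl | hz
        · omega
        · exact ih _ _ hx z hz
      · simp [hc] at h
        obtain ⟨rfl, rfl⟩ := h
        intro z hz
        rcases List.mem_cons.mp hz with rfl | hz
        · omega
        · exact le_trans (by omega) (ih _ _ hx z hz)

theorem fargmin_map {α β : Type} (f : β → Int) (g : α → β) (xs : List α) :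
    fargmin f (xs.map g) = (fargmin (fun a => f (g a)) xs).map (fun p => (p.1, g p.2)) := by
  induction xs with
  | nil => simp [fargmin]
  | cons x xs ih =>
    simp only [List.map_cons, fargmin, ih]
    cases fargmin (fun a => f (g a)) xs with
    | none => simp
    | some p => by_cases h : f (g p.2) < f (g x) <;> simp [h]

theorem min?_foldl_aux (step : Option Int → Int → Option Int)
    (hsome : ∀ m x, step (some m) x = if x < m then some x else some m)
    (xs : List Int) (m0 : Int) :
    List.foldl step (some m0) xs
    = match fargmin (fun x => x) xs with
      | none => some m0
      | some p => if p.2 < m0 then some p.2 else some m0 := by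
  induction xs generalizing m0 with
  | nil => simp [fargmin]
  | cons x xs ih =>
    simp only [List.foldl_cons, fargmin, hsome]
    by_cases hc : x < m0 <;> simp only [hc, if_true, if_false] <;>
      rw [ih] <;> cases hfx : fargmin (fun x => x) xs <;> simp only [] <;>
      split_ifs <;> first | rfl | (exfalso; omega) | (simp; omega)

theorem min?_eq_fargmin (xs : List Int) :
    PySem.List.min? xs (fun x => x) = (fargmin (fun x => x) xs).map (fun p => p.2) := by
  cases xs with
  | nil => simp [PySem.List.min?, fargmin]
  | cons x xs =>
    show List.foldl _ (some x) xs = _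
    rw [min?_foldl_aux _ (fun m x => rfl) xs x]
    simp only [fargmin]
    cases hfx : fargmin (fun x => x) xs with
    | none => simp
    | some p =>
      obtain ⟨j, y⟩ := p; simp only []
      split_ifs <;> first | rfl | (exfalso; omega) | (simp; omega)

theorem index?_fargmin (xs : List Int) (j : Nat) (m : Int)
    (h : fargmin (fun x => x) xs = some (j, m)) : PySem.List.index? xs m = some j := by
  induction xs generalizing j m with
  | nil => simp [fargmin] at h
  | cons x xs ih =>
    simp only [fargmin] at h
    cases hx : fargmin (fun x => x) xs with
    | none =>
      rw [hx] at h; simp at h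
      obtain ⟨rfl, rfl⟩ := h
      exact PySem.List.index?_cons_self ..
    | some p =>
      obtain ⟨j', y'⟩ := p
      rw [hx] at h
      by_cases hc : y' < x
      · simp [hc] at h
        obtain ⟨rfl, rfl⟩ := h
        rw [PySem.List.index?_cons_of_ne _ (by omega : x ≠ y'), ih _ _ hx]
        rfl
      · simp [hc] at h
        obtain ⟨rfl, rfl⟩ := h
        exact PySem.List.index?_cons_self ..

theorem eraseIdx_append_length_add {α : Type} (l2 : List α) (n : Nat) (l1 : List α) :
    (l1 ++ l2).eraseIdx (l1.length + n) = l1 ++ l2.eraseIdx n := by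
  induction l1 with
  | nil => simp
  | cons a t ih => simp [Nat.succ_add, ih]

theorem set_pop {α : Type} (xs : List α) (k : Nat) (h : k + 1 < xs.length) (v : α) :
    pyPopAt (PySem.List.pySetD xs (k : Int) v) ((k : Int) + 1)
      = xs.take k ++ v :: xs.drop (k + 2) := by
  unfold pyPopAt
  rw [PySem.List.pySetD_natCast]
  rw [show (k : Int) + 1 = ((k + 1 : Nat) : Int) from by push_cast; ring]
  rw [PySem.List.pop?_natCast _ (k + 1) (by simpa using h)]
  simp only
  rw [List.set_eq_take_cons_drop v (by omega)]
  rw [show xs.take k ++ v :: xs.drop (k+1) = (xs.take k ++ [v]) ++ xs.drop (k+1) from by simp]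
  rw [show k + 1 = (xs.take k ++ [v]).length + 0 from by simp [List.length_take]; omega,
    eraseIdx_append_length_add]
  simp [List.tail_drop]
  omega

theorem pyGetD_getElem' {α : Type} (xs : List α) (k : Nat) (h : k < xs.length) (d : α) :
    PySem.List.pyGetD xs (k : Int) d = xs[k] := by
  rw [PySem.List.pyGetD_natCast, List.getD_eq_getElem?_getD, List.getElem?_eq_getElem h,
    Option.getD_some]

theorem A_merge (xs : List String) (k : Nat) (hk : k + 1 < xs.length) :
    pyPopAt (PySem.List.pySetD xs (k : Int)
        (PySem.List.pyGetD xs (k : Int) "" ++ "\n\n" ++ PySem.List.pyGetD xs ((k : Int) + 1) ""))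
      ((k : Int) + 1)
    = mergeAt xs k := by
  have h2 : PySem.List.pyGetD xs ((k : Int) + 1) "" = xs[k+1] := by
    rw [show (k : Int) + 1 = ((k + 1 : Nat) : Int) from by push_cast; ring,
      pyGetD_getElem' xs (k+1) hk]
  rw [pyGetD_getElem' xs k (by omega), h2, set_pop xs k hk]
  unfold mergeAt
  rw [List.getD_eq_getElem?_getD, List.getElem?_eq_getElem (by omega : k < xs.length),
    List.getD_eq_getElem?_getD, List.getElem?_eq_getElem hk]
  rfl

theorem A_merge0 (xs : List String) (hk : 1 < xs.length) :
    pyPopAt (PySem.List.pySetD xs 0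
        (PySem.List.pyGetD xs 0 "" ++ "\n\n" ++ PySem.List.pyGetD xs 1 "")) 1
    = mergeAt xs 0 := by
  have h := A_merge xs 0 hk
  norm_num at h
  exact h

theorem A_eq_ideal (fuel : Nat) (mc : Int) (xs : List String) :
    aggLoopA fuel mc xs = idealLoop fuel mc xs := by
  induction fuel generalizing xs with
  | zero => simp [aggLoopA, idealLoop]
  | succ fuel ih =>
    simp only [aggLoopA, idealLoop]
    by_cases h1 : xs.length ≤ 1
    · simp [h1]
    · simp only [h1, if_false]
      have hne : xs ≠ [] := by intro h; subst h; simp at h1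
      obtain ⟨j, c, hF⟩ : ∃ j c, fargmin (fun s => PySem.Str.len s) xs = some (j, c) := by
        cases hx : fargmin (fun s => PySem.Str.len s) xs with
        | none => rw [fargmin_eq_none_iff] at hx; exact absurd hx hne
        | some p => exact ⟨p.1, p.2, by simp⟩
      obtain ⟨hj, hxj⟩ := fargmin_getElem _ _ _ _ hF
      have hmin := fargmin_isMin _ _ _ _ hF
      have hFA : fargmin (fun x : Int => x) (xs.map PySem.Str.len)
          = some (j, PySem.Str.len c) := by
        rw [fargmin_map]; rw [hF]; rfl
      have hA1 : PySem.List.min? (xs.map PySem.Str.len) (fun x => x) = some (PySem.Str.len c) := by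
        rw [min?_eq_fargmin, hFA]; rfl
      have hA2 : PySem.List.index? (xs.map PySem.Str.len) (PySem.Str.len c) = some j :=
        index?_fargmin _ _ _ hFA
      rw [hF]
      simp only [Option.getD_some, hA1, hA2]
      have hgj : PySem.List.pyGetD (List.map PySem.Str.len xs) ((j : Nat) : Int) 0
          = PySem.Str.len c := by
        rw [pyGetD_getElem' _ j (by simp [hj])]
        simp [hxj]
      have hallm : (xs.all fun chunk => decide (mc ≤ PySem.Str.len chunk)) = true
          ↔ mc ≤ PySem.Str.len c := by
        simp only [List.all_eq_true, decide_eq_true_eq]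
        constructor
        · intro h; exact hxj ▸ h xs[j] (List.getElem_mem hj)
        · intro h z hz; exact le_trans h (hmin z hz)
      by_cases hle : mc ≤ PySem.Str.len c
      · rw [if_pos (hallm.mpr hle), if_pos hle]
      · have hallf : ¬ ((xs.all fun chunk => decide (mc ≤ PySem.Str.len chunk)) = true) :=
          fun h => hle (hallm.mp h)
        simp only [if_neg hle, if_neg hallf, hgj, if_neg hle]
        unfold chooseK
        by_cases hj0 : j = 0
        · subst hj0
          simp only [reduceIte]
          rw [A_merge0 xs (by omega), ih]
        · have hj1 : 1 ≤ j := by omega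
          have e1 : ((j - 1 : Nat) : Int) = (j : Int) - 1 := by omega
          have e2 : ((j : Int) - 1) + 1 = (j : Int) := by ring
          by_cases hjl : j = xs.length - 1
          · simp only [if_neg hj0, if_pos hjl]
            have hk : (j - 1) + 1 < xs.length := by omega
            have ha := A_merge xs (j - 1) hk
            rw [e1, e2] at ha
            rw [ha, ih]
          · have hjlt : j + 1 < xs.length := by omega
            have aprev : PySem.List.pyGetD (List.map PySem.Str.len xs) ((j : Int) - 1) 0
                = PySem.Str.len (xs.getD (j-1) "") := by
              rw [show ((j : Int) - 1) = ((j - 1 : Nat) : Int) from by omega,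
                pyGetD_getElem' _ (j-1) (by simp; omega)]
              rw [List.getD_eq_getElem?_getD, List.getElem?_eq_getElem (by omega : j - 1 < xs.length)]
              simp
            have anext : PySem.List.pyGetD (List.map PySem.Str.len xs) ((j : Int) + 1) 0
                = PySem.Str.len (xs.getD (j+1) "") := by
              rw [show ((j : Int) + 1) = ((j + 1 : Nat) : Int) from by omega,
                pyGetD_getElem' _ (j+1) (by simp; omega)]
              rw [List.getD_eq_getElem?_getD, List.getElem?_eq_getElem (by omega : j + 1 < xs.length)]
              simp
            simp only [if_neg hj0, if_neg hjl, aprev, anext]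
            by_cases hc : PySem.Str.len (xs.getD (j-1) "") ≤ PySem.Str.len (xs.getD (j+1) "")
            · simp only [if_pos hc]
              have hk : (j - 1) + 1 < xs.length := by omega
              have ha := A_merge xs (j - 1) hk
              rw [e1, e2] at ha
              rw [ha, ih]
            · simp only [if_neg hc]
              rw [A_merge xs j hjlt, ih]


theorem getD_set_ne {α : Type} (l : List α) (i j : Nat) (v d : α) (h : i ≠ j) :
    (l.set i v).getD j d = l.getD j d := by
  rw [List.getD_eq_getElem?_getD, List.getD_eq_getElem?_getD, List.getElem?_set_ne h]

theorem getD_set_self {α : Type} (l : List α) (i : Nat) (v d : α) (h : i < l.length) :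
    (l.set i v).getD i d = v := by
  rw [List.getD_eq_getElem?_getD, List.getElem?_set_self h]; rfl

theorem getD_eq_getElem'' {α : Type} (l : List α) (i : Nat) (d : α) (h : i < l.length) :
    l.getD i d = l[i] := by
  rw [List.getD_eq_getElem?_getD, List.getElem?_eq_getElem h]; rfl

theorem eLE_trans {a b c : Int × Int} (h1 : eLE a b) (h2 : eLE b c) : eLE a c := by
  unfold eLE at *; omega

theorem entGT_eq_false_iff (x y : Int × Int) : entGT x y = false ↔ eLE x y := by
  simp [entGT, eLE]; omega

theorem eLE_of_entGT {x e : Int × Int} (h : entGT x e = true) : eLE e x := by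
  simp [entGT, eLE] at *; omega

theorem entGT_true_trans {x y e : Int × Int} (h1 : eLE y x) (h2 : entGT y e = true) :
    entGT x e = true := by
  rw [entGT_iff] at *; exact fun hxe => h2 (eLE_trans h1 hxe)

theorem entGT_false_trans {x y e : Int × Int} (h1 : eLE x y) (h2 : entGT y e = false) :
    entGT x e = false := by
  rw [entGT_eq_false_iff] at *; exact eLE_trans h1 h2

theorem pushLoop_le (ag : List (Int × Int)) (e : Int × Int) :
    ∀ (fuel lo hi : Nat), hi - lo ≤ fuel → lo ≤ hi →
    lo ≤ pushLoop ag e lo hi ∧ pushLoop ag e lo hi ≤ hi := by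
  intro fuel
  induction fuel with
  | zero =>
    intro lo hi hf h1
    have he : lo = hi := by omega
    subst he
    rw [pushLoop]; simp
  | succ fuel ih =>
    intro lo hi hf h1
    rw [pushLoop]
    by_cases h : lo < hi
    · simp only [dif_pos h]
      by_cases hgt : entGT (ag.getD ((lo + hi) / 2) (0, 0)) e = true
      · rw [if_pos hgt]
        have := ih ((lo + hi) / 2 + 1) hi (by omega) (by omega)
        omega
      · rw [if_neg hgt]
        have := ih lo ((lo + hi) / 2) (by omega) (by omega)
        omega
    · rw [dif_neg h]
      exact ⟨le_rfl, h1⟩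

theorem pushLoop_spec (ag : List (Int × Int)) (e : Int × Int) (hd : Desc ag) :
    ∀ (fuel lo hi : Nat), hi - lo ≤ fuel → lo ≤ hi → hi ≤ ag.length →
    (∀ m (hm : m < ag.length), m < lo → entGT ag[m] e = true) →
    (∀ m (hm : m < ag.length), hi ≤ m → entGT ag[m] e = false) →
    (∀ m (hm : m < ag.length), m < pushLoop ag e lo hi → entGT ag[m] e = true) ∧
    (∀ m (hm : m < ag.length), pushLoop ag e lo hi ≤ m → entGT ag[m] e = false) := by
  have hpair := List.pairwise_iff_getElem.mp hd
  intro fuel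
  induction fuel with
  | zero =>
    intro lo hi hf h1 h2 hlo hhi
    have he : lo = hi := by omega
    subst he
    rw [pushLoop, dif_neg (lt_irrefl lo)]
    exact ⟨hlo, hhi⟩
  | succ fuel ih =>
    intro lo hi hf h1 h2 hlo hhi
    rw [pushLoop]
    by_cases h : lo < hi
    · simp only [dif_pos h]
      have hmlen : (lo + hi) / 2 < ag.length := by omega
      have hgd : ag.getD ((lo + hi) / 2) (0, 0) = ag[(lo + hi) / 2] := by
        rw [List.getD_eq_getElem?_getD, List.getElem?_eq_getElem hmlen]; rfl
      rw [hgd]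
      by_cases hgt : entGT ag[(lo + hi) / 2] e = true
      · rw [if_pos hgt]
        refine ih ((lo + hi) / 2 + 1) hi (by omega) (by omega) h2 ?_ hhi
        intro m hm hmlt
        by_cases hml : m < lo
        · exact hlo m hm hml
        · by_cases hmm : m = (lo + hi) / 2
          · exact hmm ▸ hgt
          · exact entGT_true_trans (hpair m ((lo + hi) / 2) hm hmlen (by omega)) hgt
      · rw [if_neg hgt]
        refine ih lo ((lo + hi) / 2) (by omega) (by omega) (by omega) hlo ?_
        intro m hm hge
        by_cases hmm : m = (lo + hi) / 2
        · subst hmm; exact Bool.eq_false_iff.mpr hgt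
        · exact entGT_false_trans (hpair ((lo + hi) / 2) m hmlen hm (by omega))
            (Bool.eq_false_iff.mpr hgt)
    · simp only [dif_neg h]
      have he : lo = hi := by omega
      subst he
      exact ⟨hlo, hhi⟩

theorem pushB_eq (ag : List (Int × Int)) (e : Int × Int) :
    pushB ag e = ag.take (pushLoop ag e 0 ag.length) ++ e :: ag.drop (pushLoop ag e 0 ag.length) := by
  unfold pushB
  exact PySem.List.insert_natCast _ _ _ (pushLoop_le ag e ag.length 0 ag.length (by omega) (by omega)).2

theorem length_pushB (ag : List (Int × Int)) (e : Int × Int) :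
    (pushB ag e).length = ag.length + 1 := by
  have hle := (pushLoop_le ag e ag.length 0 ag.length (by omega) (by omega)).2
  rw [pushB_eq]
  simp only [List.length_append, List.length_cons, List.length_take, List.length_drop]
  omega

theorem mem_pushB_self (ag : List (Int × Int)) (e : Int × Int) : e ∈ pushB ag e := by
  rw [pushB_eq]; simp

theorem mem_pushB_of_mem {ag : List (Int × Int)} {x : Int × Int} (e : Int × Int) (h : x ∈ ag) :
    x ∈ pushB ag e := by
  rw [pushB_eq]
  rw [← List.take_append_drop (pushLoop ag e 0 ag.length) ag] at h
  rcases List.mem_append.mp h with h | h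
  · exact List.mem_append.mpr (Or.inl h)
  · exact List.mem_append.mpr (Or.inr (List.mem_cons_of_mem _ h))

theorem mem_of_mem_pushB {ag : List (Int × Int)} {x e : Int × Int} (h : x ∈ pushB ag e) :
    x ∈ ag ∨ x = e := by
  rw [pushB_eq] at h
  rcases List.mem_append.mp h with h | h
  · exact Or.inl (List.mem_of_mem_take h)
  · rcases List.mem_cons.mp h with h | h
    · exact Or.inr h
    · exact Or.inl (List.mem_of_mem_drop h)

theorem desc_pushB {ag : List (Int × Int)} (hd : Desc ag) (e : Int × Int) :
    Desc (pushB ag e) := by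
  obtain ⟨hlow, hhigh⟩ := pushLoop_spec ag e hd ag.length 0 ag.length (by omega) (by omega)
    le_rfl (by intro m hm h; omega) (fun m hm h2 => absurd hm (not_lt.mpr h2))
  have hle := (pushLoop_le ag e ag.length 0 ag.length (by omega) (by omega)).2
  set p := pushLoop ag e 0 ag.length with hp
  rw [pushB_eq, ← hp]
  have hsplit : List.Pairwise (fun x y => eLE y x) (ag.take p ++ ag.drop p) := by
    rw [List.take_append_drop]; exact hd
  obtain ⟨hd1, hd2, hcross⟩ := List.pairwise_append.mp hsplit
  unfold Desc
  rw [List.pairwise_append]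
  refine ⟨hd1, ?_, ?_⟩
  · rw [List.pairwise_cons]
    refine ⟨?_, hd2⟩
    intro y hy
    obtain ⟨i, hi, hyi⟩ := List.mem_iff_getElem.mp hy
    have hplen : p + i < ag.length := by have h2 := hi; simp [List.length_drop] at h2; omega
    have hdi : y = ag[p + i] := by rw [← hyi]; exact List.getElem_drop
    rw [hdi]
    exact (entGT_eq_false_iff _ _).mp (hhigh (p + i) hplen (by omega))
  · intro x hx y hy
    obtain ⟨i, hi, hxi⟩ := List.mem_iff_getElem.mp hx
    have hilen : i < ag.length := by have h2 := hi; simp [List.length_take] at h2; omega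
    have hip : i < p := by have h2 := hi; simp [List.length_take] at h2; omega
    have hxel : x = ag[i] := by rw [← hxi]; exact List.getElem_take
    rcases List.mem_cons.mp hy with rfl | hy
    · rw [hxel]
      exact eLE_of_entGT (hlow i hilen hip)
    · exact hcross x hx y hy


theorem ideal_of_short (fuel : Nat) (mc : Int) (xs : List String) (h : xs.length ≤ 1) :
    idealLoop fuel mc xs = xs := by
  cases fuel with
  | zero => rfl
  | succ fuel => simp [idealLoop, h]

theorem fargmin_intro {α : Type} (f : α → Int) (xs : List α) (k : Nat) (hk : k < xs.length)
    (hstrict : ∀ m (hm : m < xs.length), m < k → f xs[k] < f xs[m])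
    (hmin : ∀ m (hm : m < xs.length), f xs[k] ≤ f xs[m]) :
    fargmin f xs = some (k, xs[k]) := by
  induction xs generalizing k with
  | nil => simp at hk
  | cons x t ih =>
    cases k with
    | zero =>
      simp only [fargmin]
      cases hft : fargmin f t with
      | none => simp
      | some p =>
        obtain ⟨j, y⟩ := p
        obtain ⟨hj, hy⟩ := fargmin_getElem f t j y hft
        have hle : f x ≤ f y := by
          have := hmin (j + 1) (by simpa using hj)
          simpa [hy] using this
        simp [show ¬ f y < f x by omega]
    | succ k' =>
      have hk' : k' < t.length := by simpa using hk
      have hft : fargmin f t = some (k', t[k']) := by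
        apply ih k' hk'
        · intro m hm hmk
          have := hstrict (m + 1) (by simpa using hm) (by omega)
          simpa using this
        · intro m hm
          have := hmin (m + 1) (by simpa using hm)
          simpa using this
      have hlt : f t[k'] < f x := by
        have := hstrict 0 (by simp) (by omega)
        simpa using this
      simp only [fargmin, hft, hlt, if_pos hlt]
      simp

theorem linked_congr (prev nxt prev' nxt' : List (Option Int)) (p : Option Int) (ids : List Nat) :
    (∀ i ∈ ids, prev'.getD i none = prev.getD i none) →
    (∀ i ∈ ids, nxt'.getD i none = nxt.getD i none) →
    Linked prev nxt p ids → Linked prev' nxt' p ids := by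
  induction ids generalizing p with
  | nil => intro _ _ _; trivial
  | cons a t ih =>
    intro hp hn h
    obtain ⟨h1, h2, h3⟩ := h
    exact ⟨by rw [hp a (by simp)]; exact h1, by rw [hn a (by simp)]; exact h2,
      ih _ (fun i hi => hp i (by simp [hi])) (fun i hi => hn i (by simp [hi])) h3⟩

theorem linked_getElem (prev nxt : List (Option Int)) (p : Option Int) (ids : List Nat) :
    Linked prev nxt p ids → ∀ (k : Nat) (hk : k < ids.length),
    (prev.getD ids[k] none = if h0 : k = 0 then p else some ((ids[k - 1]'(by omega) : Nat) : Int)) ∧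
    nxt.getD ids[k] none = (ids[k + 1]?).map (fun b => ((b : Nat) : Int)) := by
  induction ids generalizing p with
  | nil => intro _ k hk; simp at hk
  | cons a t ih =>
    intro h k hk
    obtain ⟨h1, h2, h3⟩ := h
    cases k with
    | zero =>
      refine ⟨by simpa using h1, ?_⟩
      simpa [List.head?_eq_getElem?] using h2
    | succ k' =>
      have hk' : k' < t.length := by simpa using hk
      obtain ⟨ih1, ih2⟩ := ih _ h3 k' hk'
      constructor
      · cases k' with
        | zero => simpa using ih1
        | succ k'' => simpa using ih1
      · simpa using ih2

theorem linked_merge (prev nxt : List (Option Int)) (p : Option Int) (P R : List Nat) (a b : Nat)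
    (ha : a < nxt.length) (hRp : ∀ x ∈ R, x < prev.length) :
    (P ++ a :: b :: R).Pairwise (· < ·) →
    Linked prev nxt p (P ++ a :: b :: R) →
    Linked (match R.head? with | some c => prev.set c (some (a : Int)) | none => prev)
           (nxt.set a (R.head?.map (fun c => ((c : Nat) : Int)))) p (P ++ a :: R) := by
  induction P generalizing p with
  | nil =>
    intro hsorted h
    obtain ⟨h1, h2, h3⟩ := h
    obtain ⟨h4, h5, h6⟩ := h3
    simp only [List.nil_append] at *
    obtain ⟨hs1, hs2⟩ := List.pairwise_cons.mp hsorted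
    obtain ⟨hs3, hs4⟩ := List.pairwise_cons.mp hs2
    refine ⟨?_, ?_, ?_⟩
    · cases hR : R.head? with
      | none => simpa using h1
      | some c =>
        have hcR : c ∈ R := List.mem_of_mem_head? hR
        have hca : c ≠ a := Ne.symm (ne_of_lt (hs1 c (by simp [hcR])))
        simp only [hR]
        rw [getD_set_ne _ _ _ _ _ (fun he => hca.symm he.symm)]
        exact h1
    · rw [getD_set_self _ _ _ _ ha]
    · cases R with
      | nil => trivial
      | cons c R' =>
        obtain ⟨hs5, hs6⟩ := List.pairwise_cons.mp hs4
        refine ⟨?_, ?_, ?_⟩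
        · simp only [List.head?_cons]
          have hcp : c < prev.length := hRp c (by simp)
          rw [getD_set_self _ _ _ _ hcp]
        · have hca : c ≠ a := Ne.symm (ne_of_lt (hs1 c (by simp)))
          rw [getD_set_ne _ _ _ _ _ (fun he => hca he.symm)]
          exact h6.2.1
        · apply linked_congr prev nxt _ _ _ _ _ _ h6.2.2
          · intro i hi
            simp only [List.head?_cons]
            have hic : i ≠ c := Ne.symm (ne_of_lt (hs5 i hi))
            rw [getD_set_ne _ _ _ _ _ (fun he => hic he.symm)]
          · intro i hi
            have hia : i ≠ a := Ne.symm (ne_of_lt (hs1 i (by simp [hi])))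
            rw [getD_set_ne _ _ _ _ _ (fun he => hia he.symm)]
  | cons x P' ih =>
    intro hsorted h
    obtain ⟨h1, h2, h3⟩ := h
    obtain ⟨hx, hsorted'⟩ := List.pairwise_cons.mp hsorted
    have hxa : x ≠ a := ne_of_lt (hx a (by simp))
    refine ⟨?_, ?_, ih _ hsorted' h3⟩
    · cases hR : R.head? with
      | none => simpa using h1
      | some c =>
        have hcR : c ∈ R := List.mem_of_mem_head? hR
        have hxc : x ≠ c := ne_of_lt (hx c (by simp [hcR]))
        simp only [hR]
        rw [getD_set_ne _ _ _ _ _ (fun he => hxc he.symm)]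
        exact h1
    · rw [getD_set_ne _ _ _ _ _ (fun he => hxa he.symm)]
      rw [h2]
      cases P' <;> simp


theorem linked_init (n : Nat) : ∀ (k a : Nat), a + k = n →
    Linked ((List.range n).map (fun i : Nat => if 0 < i then some ((i : Int) - 1) else none))
           ((List.range n).map (fun i : Nat => if i < n - 1 then some ((i : Int) + 1) else none))
           (if a = 0 then none else some ((a : Int) - 1)) (List.range' a k) := by
  intro k
  induction k with
  | zero => intro a _; trivial
  | succ k ih =>
    intro a hak
    rw [List.range'_succ]
    have han : a < n := by omega
    refine ⟨?_, ?_, ?_⟩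
    · rw [PySem.List.getD_map_range _ _ _ _ han]
      by_cases h0 : a = 0
      · simp [h0]
      · rw [if_pos (Nat.pos_of_ne_zero h0), if_neg h0]
    · rw [PySem.List.getD_map_range _ _ _ _ han]
      cases k with
      | zero =>
        have : ¬ a < n - 1 := by omega
        simp [this]
      | succ k' =>
        have hlt : a < n - 1 := by omega
        rw [List.range'_succ]
        simp only [if_pos hlt, List.head?_cons, Option.map_some, Option.some.injEq]
        omega
    · have := ih (a + 1) (by omega)
      have he : (if a + 1 = 0 then (none : Option Int) else some (((a + 1 : Nat) : Int) - 1))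
          = some ((a : Nat) : Int) := by
        push_cast; simp
      exact he ▸ this

theorem idsOf_sorted (n : Nat) (alive : List Bool) : (idsOf n alive).Pairwise (· < ·) :=
  List.Pairwise.sublist List.filter_sublist List.pairwise_lt_range

theorem mem_idsOf {n : Nat} {alive : List Bool} {i : Nat} :
    i ∈ idsOf n alive ↔ i < n ∧ alive.getD i false = true := by
  simp [idsOf, List.mem_filter, List.mem_range]

theorem idsOf_replicate_true (n : Nat) : idsOf n (List.replicate n true) = List.range n := by
  apply List.filter_eq_self.mpr
  intro a ha
  rw [List.getD_eq_getElem?_getD, List.getElem?_replicate]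
  simp [List.mem_range.mp ha]

theorem map_getD_range {α : Type} (xs : List α) (d : α) :
    (List.range xs.length).map (fun i => xs.getD i d) = xs := by
  apply List.ext_getElem
  · simp
  · intro i h1 h2
    simp only [List.getElem_map, List.getElem_range]
    exact getD_eq_getElem'' xs i d h2

theorem idsOf_set_false (n : Nat) (alive : List Bool) (b : Nat) (hb : b < n)
    (hlen : alive.length = n) :
    idsOf n (alive.set b false) = (idsOf n alive).filter (fun i => decide (i ≠ b)) := by
  unfold idsOf
  rw [List.filter_filter]
  apply List.filter_congr
  intro i hi
  by_cases hib : i = b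
  · subst hib
    rw [getD_set_self _ _ _ _ (by omega)]
    simp
  · rw [getD_set_ne _ _ _ _ _ (fun he => hib he.symm)]
    simp [hib]

theorem filter_ne_of_decomp (P R : List Nat) (a b : Nat)
    (hPa : ∀ x ∈ P, x ≠ b) (hab : a ≠ b) (hR : ∀ x ∈ R, x ≠ b) :
    (P ++ a :: b :: R).filter (fun i => decide (i ≠ b)) = P ++ a :: R := by
  rw [List.filter_append]
  have h1 : P.filter (fun i => decide (i ≠ b)) = P := by
    rw [List.filter_eq_self]
    intro x hx
    simpa using hPa x hx
  have h2 : R.filter (fun i => decide (i ≠ b)) = R := by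
    rw [List.filter_eq_self]
    intro x hx
    simpa using hR x hx
  rw [h1]
  rw [List.filter_cons_of_pos (by simpa using hab), List.filter_cons_of_neg (by simp), h2]

 


theorem foldl_pushB_inv (sizes : List Int) (n : Nat) :
    ∀ (l : List Nat) (ag0 : List (Int × Int)), Desc ag0 → (∀ i ∈ l, i < n) →
    Desc (l.foldl (fun ag (i : Nat) => pushB ag (PySem.List.pyGetD sizes (i : Int) 0, (i : Int))) ag0) ∧
    (l.foldl (fun ag (i : Nat) => pushB ag (PySem.List.pyGetD sizes (i : Int) 0, (i : Int))) ag0).length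
      = ag0.length + l.length ∧
    (∀ x ∈ ag0, x ∈ l.foldl (fun ag (i : Nat) => pushB ag (PySem.List.pyGetD sizes (i : Int) 0, (i : Int))) ag0) ∧
    (∀ i ∈ l, (sizes.getD i 0, (i : Int))
      ∈ l.foldl (fun ag (i : Nat) => pushB ag (PySem.List.pyGetD sizes (i : Int) 0, (i : Int))) ag0) ∧
    (∀ e ∈ l.foldl (fun ag (i : Nat) => pushB ag (PySem.List.pyGetD sizes (i : Int) 0, (i : Int))) ag0,
      e ∈ ag0 ∨ ∃ i : Nat, e.2 = (i : Int) ∧ i < n) := by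
  intro l
  induction l with
  | nil => intro ag0 h0 _; exact ⟨h0, by simp, fun x hx => hx, by simp, fun e he => Or.inl he⟩
  | cons i l ih =>
    intro ag0 h0 hln
    have hstep : PySem.List.pyGetD sizes ((i : Nat) : Int) 0 = sizes.getD i 0 := by
      simp
    obtain ⟨d1, d2, d3, d4, d5⟩ := ih (pushB ag0 (PySem.List.pyGetD sizes (i : Int) 0, (i : Int)))
      (desc_pushB h0 _) (fun x hx => hln x (by simp [hx]))
    refine ⟨d1, ?_, ?_, ?_, ?_⟩
    · simp only [List.foldl_cons] at *
      rw [d2, length_pushB]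
      simp [Nat.add_assoc, Nat.add_comm 1]
    · intro x hx
      simp only [List.foldl_cons]
      exact d3 x (mem_pushB_of_mem _ hx)
    · intro i' hi'
      rcases List.mem_cons.mp hi' with rfl | hi'
      · simp only [List.foldl_cons]
        refine d3 _ ?_
        rw [← hstep]
        exact mem_pushB_self ag0 _
      · exact d4 i' hi'
    · intro e he
      simp only [List.foldl_cons] at he
      rcases d5 e he with he' | he'
      · rcases mem_of_mem_pushB he' with h | h
        · exact Or.inl h
        · exact Or.inr ⟨i, by simp [h], hln i (by simp)⟩
      · exact Or.inr he'

theorem B_sim (mc : Int) (n : Nat) : ∀ (fuel : Nat) (sizes : List Int) (texts : List String)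
    (prev nxt : List (Option Int)) (alive : List Bool) (agenda : List (Int × Int)) (count : Int),
    InvB n sizes texts prev nxt alive agenda count →
    agenda.length + 2 * (idsOf n alive).length ≤ fuel →
    absOf n (aggLoopB fuel mc sizes texts prev nxt alive agenda count).1
           (aggLoopB fuel mc sizes texts prev nxt alive agenda count).2
      = idealLoop (idsOf n alive).length mc (absOf n alive texts) := by
  intro fuel
  induction fuel with
  | zero =>
    intro sizes texts prev nxt alive agenda count _ hfuel
    have h0 : (idsOf n alive).length = 0 := by omega
    rw [h0]
    rfl
  | succ fuel ih =>
    intro sizes texts prev nxt alive agenda count hInv hfuel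
    obtain ⟨hsl, htl, hpl, hnl, hal, hcnt, hsz, hlink, hdesc, hmem, hrange⟩ := hInv
    by_cases hc1 : count ≤ 1
    · simp only [aggLoopB]
      rw [if_pos hc1]
      have hlen1 : (idsOf n alive).length ≤ 1 := by omega
      rw [ideal_of_short _ _ _ (by simpa [absOf] using hlen1)]
    · -- count > 1: the agenda is nonempty, pop its last entry
      have hlen2 : 2 ≤ (idsOf n alive).length := by omega
      have hidne : idsOf n alive ≠ [] := by
        intro h; rw [h] at hlen2; simp at hlen2
      have hne : agenda ≠ [] := by
        obtain ⟨i0, hi0⟩ := List.exists_mem_of_ne_nil _ hidne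
        exact List.ne_nil_of_mem (hmem i0 hi0)
      have hpop : PySem.List.pop? agenda (-1) = some (agenda.getLast hne, agenda.dropLast) := by
        conv_lhs => rw [← List.dropLast_append_getLast hne]
        exact PySem.List.pop?_last _ _
      rcases hL : agenda.getLast hne with ⟨s, jI⟩
      have hlast_mem : (s, jI) ∈ agenda := hL ▸ List.getLast_mem hne
      obtain ⟨jN, hjI, hjn⟩ := hrange _ hlast_mem
      simp only at hjI
      -- the cross fact: the last entry is ≤ every other entry
      have hcross : ∀ x ∈ agenda.dropLast, eLE (s, jI) x := by
        have hsp : List.Pairwise (fun x y => eLE y x) (agenda.dropLast ++ [(s, jI)]) := by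
          have h2 := List.dropLast_append_getLast hne
          rw [hL] at h2
          rw [h2]
          exact hdesc
        intro x hx
        exact (List.pairwise_append.mp hsp).2.2 x hx (s, jI) (by simp)
      simp only [aggLoopB]
      rw [if_neg hc1, hpop, hL]
      simp only []
      by_cases hstale : ¬ (PySem.List.pyGetD alive jI false = true) ∨
          ¬ (s = PySem.List.pyGetD sizes jI 0)
      · -- stale entry: drop it and continue
        rw [if_pos hstale]
        have hmem' : ∀ i ∈ idsOf n alive, (sizes.getD i 0, ((i : Nat) : Int)) ∈ agenda.dropLast := by
          intro i hi
          have he := hmem i hi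
          rw [← List.dropLast_append_getLast hne, hL] at he
          rcases List.mem_append.mp he with h | h
          · exact h
          · exfalso
            simp only [List.mem_singleton, Prod.mk.injEq] at h
            obtain ⟨hs', hj'⟩ := h
            have hij : i = jN := by
              have := hj'.trans hjI; exact_mod_cast this
            subst hij
            rcases hstale with h1 | h1
            · exact h1 (by rw [hjI]; simpa using (mem_idsOf.mp hi).2)
            · exact h1 (by rw [hjI, ← hs']; simp)
        have := ih sizes texts prev nxt alive agenda.dropLast count
          ⟨hsl, htl, hpl, hnl, hal, hcnt, hsz, hlink,
            List.Pairwise.sublist (List.dropLast_sublist _) hdesc, hmem',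
            fun e he => hrange e (List.Sublist.mem he (List.dropLast_sublist _))⟩
          (by
            have hag1 : 0 < agenda.length := List.length_pos_of_ne_nil hne
            rw [List.length_dropLast]; omega)
        exact this
      · -- valid entry: the popped id is the leftmost smallest alive chunk
        rw [if_neg hstale]
        push_neg at hstale
        obtain ⟨hv1, hv2⟩ := hstale
        have halivej : alive.getD jN false = true := by rw [hjI] at hv1; simpa using hv1
        have hsj : s = sizes.getD jN 0 := by rw [hjI] at hv2; simpa using hv2
        have hjin : jN ∈ idsOf n alive := mem_idsOf.mpr ⟨hjn, halivej⟩
        have hlexmin : ∀ i ∈ idsOf n alive, i ≠ jN →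
            sizes.getD jN 0 < sizes.getD i 0 ∨
            (sizes.getD jN 0 = sizes.getD i 0 ∧ jN < i) := by
          intro i hi hne'
          have he := hmem i hi
          rw [← List.dropLast_append_getLast hne, hL] at he
          rcases List.mem_append.mp he with h | h
          · have := hcross _ h
            rw [hsj] at this
            unfold eLE at this
            simp only [hjI] at this
            rcases this with h' | ⟨h1', h2'⟩
            · exact Or.inl h'
            · refine Or.inr ⟨h1', ?_⟩
              have hle : (jN : Int) ≤ (i : Int) := h2'
              have hne2 : jN ≠ i := fun he => hne' he.symm
              omega
          · exfalso
            simp only [List.mem_singleton, Prod.mk.injEq] at h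
            have : i = jN := by
              have := h.2.trans hjI; exact_mod_cast this
            exact hne' this
        -- position of jN in the alive-id list
        obtain ⟨k, hk, hidk⟩ := List.mem_iff_getElem.mp hjin
        have hxslen : (absOf n alive texts).length = (idsOf n alive).length := by
          simp [absOf]
        have hxm : ∀ (m : Nat) (hm : m < (idsOf n alive).length),
            (absOf n alive texts)[m]'(by rw [hxslen]; exact hm)
              = texts.getD ((idsOf n alive)[m]) "" := by
          intro m hm; simp [absOf]
        have hlenm : ∀ (m : Nat) (hm : m < (idsOf n alive).length),
            PySem.Str.len ((absOf n alive texts)[m]'(by rw [hxslen]; exact hm))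
              = sizes.getD ((idsOf n alive)[m]) 0 := by
          intro m hm
          rw [hxm m hm, ← hsz _ (List.getElem_mem hm)]
        have hpairget := List.pairwise_iff_getElem.mp (idsOf_sorted n alive)
        have hfarg : fargmin PySem.Str.len (absOf n alive texts)
            = some (k, (absOf n alive texts)[k]'(by rw [hxslen]; exact hk)) := by
          apply fargmin_intro
          · intro m hm hmk
            have hm' : m < (idsOf n alive).length := by rwa [hxslen] at hm
            rw [hlenm k hk, hlenm m hm', hidk]
            have hlt : (idsOf n alive)[m] < jN := by
              rw [← hidk]; exact hpairget m k hm' hk hmk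
            rcases hlexmin _ (List.getElem_mem hm') (by omega) with h | ⟨h1, h2⟩
            · exact h
            · omega
          · intro m hm
            have hm' : m < (idsOf n alive).length := by rwa [hxslen] at hm
            rw [hlenm k hk, hlenm m hm', hidk]
            by_cases hmj : (idsOf n alive)[m] = jN
            · rw [hmj]
            · rcases hlexmin _ (List.getElem_mem hm') hmj with h | ⟨h1, h2⟩
              · omega
              · omega
        have hsxk : PySem.Str.len ((absOf n alive texts)[k]'(by rw [hxslen]; exact hk)) = s := by
          rw [hlenm k hk, hidk, ← hsj]
        by_cases hbrk : mc ≤ s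
        · rw [if_pos hbrk]
          conv_rhs => rw [show (idsOf n alive).length = ((idsOf n alive).length - 1) + 1 from by omega]
          simp only [idealLoop]
          rw [if_neg (by rw [hxslen]; omega), hfarg]
          simp only []
          rw [if_pos (by rw [hsxk]; exact hbrk)]
        · rw [if_neg hbrk]
          -- merge step
          set k' := chooseK (absOf n alive texts) k with hk'def
          have hk'1 : k' + 1 < (idsOf n alive).length := by
            rw [hk'def]
            unfold chooseK
            rw [hxslen]
            split_ifs <;> omega
          have hk'cases : k' = k ∨ k' + 1 = k := by
            rw [hk'def]
            unfold chooseK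
            rw [hxslen]
            split_ifs <;> omega
          set aN := (idsOf n alive)[k']'(by omega) with haNdef
          set bN := (idsOf n alive)[k' + 1]'(by omega) with hbNdef
          have haNmem : aN ∈ idsOf n alive := haNdef ▸ List.getElem_mem _
          have hbNmem : bN ∈ idsOf n alive := hbNdef ▸ List.getElem_mem _
          have haNn : aN < n := (mem_idsOf.mp haNmem).1
          have hbNn : bN < n := (mem_idsOf.mp hbNmem).1
          obtain ⟨hprevj, hnxtj⟩ := linked_getElem prev nxt none (idsOf n alive) hlink k hk
          rw [hidk] at hprevj hnxtj
          -- the port's chosen left id equals aN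
          rw [hjI]
          simp only [PySem.List.pyGetD_natCast]
          have hgc : ∀ {i j : Nat} (hi : i < (idsOf n alive).length)
              (hj : j < (idsOf n alive).length), i = j →
              (idsOf n alive)[i]'hi = (idsOf n alive)[j]'hj := by
            intro i j hi hj h; subst h; rfl
          have hsp : sizes.getD ((idsOf n alive)[k - 1]'(by omega)) 0
              = PySem.Str.len ((absOf n alive texts).getD (k - 1) "") := by
            rw [getD_eq_getElem'' (absOf n alive texts) (k - 1) "" (by rw [hxslen]; omega),
              hlenm (k - 1) (by omega)]
          have hsn : ∀ (hkm : k + 1 < (idsOf n alive).length),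
              sizes.getD ((idsOf n alive)[k + 1]'hkm) 0
              = PySem.Str.len ((absOf n alive texts).getD (k + 1) "") := by
            intro hkm
            rw [getD_eq_getElem'' (absOf n alive texts) (k + 1) "" (by rw [hxslen]; omega),
              hlenm (k + 1) (by omega)]
          have hporta : (match prev.getD jN none, nxt.getD jN none with
               | none, _ => ((jN : Nat) : Int)
               | some pv, none => pv
               | some pv, some qv =>
                 if PySem.List.pyGetD sizes pv 0 ≤ PySem.List.pyGetD sizes qv 0 then pv
                 else ((jN : Nat) : Int))
              = ((aN : Nat) : Int) := by
            by_cases hk0 : k = 0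
            · have hkk' : k' = 0 := by rw [hk'def]; unfold chooseK; rw [if_pos hk0]
              have hja : jN = aN := by
                rw [← hidk, haNdef]
                exact hgc hk (by omega) (by omega)
              rw [hprevj, dif_pos hk0]
              simp only []
              rw [hja]
            · by_cases hkl : k = (idsOf n alive).length - 1
              · have hkk' : k' = k - 1 := by
                  rw [hk'def]; unfold chooseK
                  rw [if_neg hk0, if_pos (by rw [hxslen]; exact hkl)]
                have hpa : (idsOf n alive)[k - 1]'(by omega) = aN := by
                  rw [haNdef]
                  exact hgc (by omega) (by omega) (by omega)
                have hq : nxt.getD jN none = none := by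
                  rw [hnxtj, List.getElem?_eq_none (by omega)]
                  rfl
                rw [hprevj, dif_neg hk0, hq]
                simp only []
                rw [hpa]
              · have hkm : k + 1 < (idsOf n alive).length := by omega
                have hq : nxt.getD jN none
                    = some (((idsOf n alive)[k + 1]'hkm : Nat) : Int) := by
                  rw [hnxtj, List.getElem?_eq_getElem hkm]
                  rfl
                rw [hprevj, dif_neg hk0, hq]
                simp only [PySem.List.pyGetD_natCast]
                rw [hsp, hsn hkm]
                by_cases hcmp : PySem.Str.len ((absOf n alive texts).getD (k - 1) "")
                    ≤ PySem.Str.len ((absOf n alive texts).getD (k + 1) "")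
                · have hkk' : k' = k - 1 := by
                    rw [hk'def]; unfold chooseK
                    rw [if_neg hk0, if_neg (by rw [hxslen]; exact hkl), if_pos hcmp]
                  have hpa : (idsOf n alive)[k - 1]'(by omega) = aN := by
                    rw [haNdef]
                    exact hgc (by omega) (by omega) (by omega)
                  rw [if_pos hcmp, hpa]
                · have hkk' : k' = k := by
                    rw [hk'def]; unfold chooseK
                    rw [if_neg hk0, if_neg (by rw [hxslen]; exact hkl), if_neg hcmp]
                  have hja : jN = aN := by
                    rw [← hidk, haNdef]
                    exact hgc hk (by omega) (by omega)
                  rw [if_neg hcmp, hja]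
          rw [hporta]
          obtain ⟨hpk', hnk'⟩ := linked_getElem prev nxt none (idsOf n alive) hlink k' (by omega)
          obtain ⟨hpk1, hnk1⟩ := linked_getElem prev nxt none (idsOf n alive) hlink (k' + 1) (by omega)
          have hnxta : nxt.getD aN none = some ((bN : Nat) : Int) := by
            rw [← haNdef] at hnk'
            rw [hnk', List.getElem?_eq_getElem hk'1]
            rw [← hbNdef]
            rfl
          simp only [PySem.List.pyGetD_natCast]
          rw [hnxta]
          simp only [PySem.List.pySetD_natCast, PySem.List.pyGetD_natCast]
          -- decomposition of the alive ids around the merged pair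
          have habN : aN < bN := by
            rw [haNdef, hbNdef]; exact hpairget k' (k' + 1) (by omega) (by omega) (by omega)
          have habne : aN ≠ bN := Nat.ne_of_lt habN
          set P := (idsOf n alive).take k' with hPdef
          set R := (idsOf n alive).drop (k' + 2) with hRdef
          have hdecomp : idsOf n alive = P ++ aN :: bN :: R := by
            rw [hPdef, hRdef, haNdef, hbNdef]
            conv_lhs => rw [← List.take_append_drop k' (idsOf n alive)]
            congr 1
            rw [List.drop_eq_getElem_cons (by omega : k' < (idsOf n alive).length),
              List.drop_eq_getElem_cons (by omega : k' + 1 < (idsOf n alive).length)]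
          have hPmem : ∀ x ∈ P, x ∈ idsOf n alive := by
            intro x hx; rw [hdecomp]; simp [hx]
          have hRmem : ∀ x ∈ R, x ∈ idsOf n alive := by
            intro x hx; rw [hdecomp]; simp [hx]
          have hidsmem_lt : ∀ x ∈ idsOf n alive, x < n := fun x hx => (mem_idsOf.mp hx).1
          have hsortdec : (P ++ aN :: bN :: R).Pairwise (· < ·) := hdecomp ▸ idsOf_sorted n alive
          obtain ⟨hsP, hsQ, hsCross⟩ := List.pairwise_append.mp hsortdec
          obtain ⟨hsa, hsQ2⟩ := List.pairwise_cons.mp hsQ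
          obtain ⟨hsb, hsR⟩ := List.pairwise_cons.mp hsQ2
          have hidsN : idsOf n (alive.set bN false) = P ++ aN :: R := by
            rw [idsOf_set_false n alive bN hbNn hal, hdecomp, filter_ne_of_decomp _ _ _ _
              (fun x hx => (hsCross x hx bN (by simp)).ne)
              habne (fun x hx => (hsb x hx).ne')]
          have hPlen : P.length = k' := by
            rw [hPdef]; rw [List.length_take]; omega
          have hRlen : R.length = (idsOf n alive).length - (k' + 2) := by
            rw [hRdef]; simp
          have hlenN : (P ++ aN :: R).length = (idsOf n alive).length - 1 := by
            simp only [List.length_append, List.length_cons, hPlen, hRlen]; omega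
          have hjab : jN = aN ∨ jN = bN := by
            rcases hk'cases with h | h
            · left; rw [← hidk, haNdef]; exact hgc hk (by omega) h.symm
            · right; rw [← hidk, hbNdef]; exact hgc hk (by omega) h.symm
          have hRhead : R.head? = (idsOf n alive)[k' + 2]? := by
            rw [hRdef]; exact List.head?_drop
          have hnbval : nxt.getD bN none
              = R.head?.map (fun c : Nat => ((c : Nat) : Int)) := by
            have h1 := hnk1
            rw [← hbNdef] at h1
            rw [h1, hRhead, show k' + 1 + 1 = k' + 2 from rfl]
          -- normalize the new state's components
          rw [getD_set_self sizes aN _ 0 (by omega : aN < sizes.length)]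
          rw [hnbval]
          have hscrut2 : (nxt.set aN (R.head?.map (fun c : Nat => ((c : Nat) : Int)))).getD bN none
              = R.head?.map (fun c : Nat => ((c : Nat) : Int)) := by
            rw [getD_set_ne _ _ _ _ _ habne]; exact hnbval
          rw [hscrut2]
          have hprevN : (match R.head?.map (fun c : Nat => ((c : Nat) : Int)) with
              | some c => PySem.List.pySetD prev c (some ((aN : Nat) : Int))
              | none => prev)
              = (match R.head? with
                 | some c => prev.set c (some ((aN : Nat) : Int))
                 | none => prev) := by
            cases hh : R.head? <;> simp
          rw [hprevN]
          -- the invariant for the merged state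
          have hInvN : InvB n (sizes.set aN (sizes.getD aN 0 + (2 + sizes.getD bN 0)))
              (texts.set aN (texts.getD aN "" ++ "\n\n" ++ texts.getD bN ""))
              (match R.head? with
               | some c => prev.set c (some ((aN : Nat) : Int))
               | none => prev)
              (nxt.set aN (R.head?.map (fun c : Nat => ((c : Nat) : Int))))
              (alive.set bN false)
              (pushB agenda.dropLast (sizes.getD aN 0 + (2 + sizes.getD bN 0), ((aN : Nat) : Int)))
              (count - 1) := by
            refine ⟨by simp [hsl], by simp [htl], ?_, by simp [hnl], by simp [hal], ?_, ?_, ?_, ?_, ?_, ?_⟩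
            · cases R.head? <;> simp [hpl]
            · rw [hidsN, hlenN, hcnt]; push_cast; omega
            · intro i hi
              rw [hidsN] at hi
              by_cases hia : i = aN
              · subst hia
                rw [getD_set_self _ _ _ _ (by omega : aN < sizes.length),
                  getD_set_self _ _ _ _ (by omega : aN < texts.length)]
                rw [hsz aN haNmem, hsz bN hbNmem, PySem.Str.len_append, PySem.Str.len_append]
                have h2 : PySem.Str.len "\n\n" = 2 := by decide
                omega
              · rw [getD_set_ne _ _ _ _ _ (fun he => hia he.symm),
                  getD_set_ne _ _ _ _ _ (fun he => hia he.symm)]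
                apply hsz
                rcases List.mem_append.mp hi with h | h
                · exact hPmem i h
                · rcases List.mem_cons.mp h with rfl | h
                  · exact haNmem
                  · exact hRmem i h
            · rw [hidsN]
              exact linked_merge prev nxt none P R aN bN (by omega)
                (fun x hx => by have := hidsmem_lt x (hRmem x hx); omega)
                hsortdec (hdecomp ▸ hlink)
            · exact desc_pushB (List.Pairwise.sublist (List.dropLast_sublist _) hdesc) _
            · intro i hi
              rw [hidsN] at hi
              by_cases hia : i = aN
              · subst hia
                rw [getD_set_self _ _ _ _ (by omega : aN < sizes.length)]
                exact mem_pushB_self _ _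
              · have hib : i ≠ bN := by
                  rintro rfl
                  rcases List.mem_append.mp hi with h | h
                  · exact absurd (hsCross bN h bN (by simp)) (lt_irrefl bN)
                  · rcases List.mem_cons.mp h with h' | h'
                    · exact habne h'.symm
                    · exact absurd (hsb bN h') (lt_irrefl bN)
                have hiids : i ∈ idsOf n alive := by
                  rcases List.mem_append.mp hi with h | h
                  · exact hPmem i h
                  · rcases List.mem_cons.mp h with rfl | h
                    · exact haNmem
                    · exact hRmem i h
                have hij : i ≠ jN := by
                  intro he
                  rcases hjab with h2 | h2
                  · exact hia (he.trans h2)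
                  · exact hib (he.trans h2)
                rw [getD_set_ne _ _ _ _ _ (fun he => hia he.symm)]
                apply mem_pushB_of_mem
                have he := hmem i hiids
                rw [← List.dropLast_append_getLast hne, hL] at he
                rcases List.mem_append.mp he with h | h
                · exact h
                · exfalso
                  simp only [List.mem_singleton, Prod.mk.injEq] at h
                  have : i = jN := by have := h.2.trans hjI; exact_mod_cast this
                  exact hij this
            · intro e he
              rcases mem_of_mem_pushB he with h | h
              · exact hrange e (List.Sublist.mem h (List.dropLast_sublist _))
              · exact ⟨aN, by simp [h], haNn⟩
          -- abstraction of the merged state is exactly the ideal merge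
          have habs : absOf n (alive.set bN false)
              (texts.set aN (texts.getD aN "" ++ "\n\n" ++ texts.getD bN ""))
              = mergeAt (absOf n alive texts) k' := by
            have hxtake : (absOf n alive texts).take k'
                = P.map (fun i => texts.getD i "") := by
              unfold absOf
              rw [← List.map_take, ← hPdef]
            have hxdrop : (absOf n alive texts).drop (k' + 2)
                = R.map (fun i => texts.getD i "") := by
              unfold absOf
              rw [← List.map_drop, ← hRdef]
            have hxk' : (absOf n alive texts).getD k' "" = texts.getD aN "" := by
              rw [getD_eq_getElem'' _ _ _ (by rw [hxslen]; omega), hxm k' (by omega), ← haNdef]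
            have hxk1 : (absOf n alive texts).getD (k' + 1) "" = texts.getD bN "" := by
              rw [getD_eq_getElem'' _ _ _ (by rw [hxslen]; omega), hxm (k' + 1) (by omega), ← hbNdef]
            unfold mergeAt
            rw [hxtake, hxdrop, hxk', hxk1]
            unfold absOf
            rw [hidsN, List.map_append, List.map_cons]
            congr 1
            · apply List.map_congr_left
              intro x hx
              rw [getD_set_ne _ _ _ _ _ (hsCross x hx aN (by simp)).ne']
            congr 1
            · rw [getD_set_self _ _ _ _ (by omega : aN < texts.length)]
            · apply List.map_congr_left
              intro x hx
              rw [getD_set_ne _ _ _ _ _ (hsa x (by simp [hx])).ne]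
          have hfuelN : (pushB agenda.dropLast
                (sizes.getD aN 0 + (2 + sizes.getD bN 0), ((aN : Nat) : Int))).length
              + 2 * (idsOf n (alive.set bN false)).length ≤ fuel := by
            rw [length_pushB, List.length_dropLast, hidsN, hlenN]
            have hag1 : 0 < agenda.length := List.length_pos_of_ne_nil hne
            omega
          rw [ih _ _ _ _ _ _ _ hInvN hfuelN]
          rw [habs, hidsN, hlenN]
          conv_rhs => rw [show (idsOf n alive).length = ((idsOf n alive).length - 1) + 1 from by omega]
          simp only [idealLoop]
          rw [if_neg (by rw [hxslen]; omega), hfarg]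
          simp only []
          rw [if_neg (by rw [hsxk]; exact hbrk), ← hk'def]



-- ===== VERDICT (by name: the statement is the Claim_ definition above) =====
theorem agglomerate_chunks_spec : Claim_equal_agglomerate_chunks := by
  intro chunks min_chars _
  unfold Spec_agglomerate_chunks agglomerate_chunks agglomerate_chunks_alt
  by_cases h1 : chunks.length ≤ 1
  · rw [if_pos h1]
    rcases chunks with _ | ⟨x, _ | ⟨y, t⟩⟩
    · rfl
    · simp [aggLoopA]
    · simp at h1
  · rw [if_neg h1]
    have hn2 : 2 ≤ chunks.length := by omega
    obtain ⟨d1, d2, d3, d4, d5⟩ := foldl_pushB_inv (chunks.map PySem.Str.len) chunks.length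
      (List.range chunks.length) [] (by unfold Desc; exact List.Pairwise.nil)
      (fun i hi => List.mem_range.mp hi)
    have hids0 : idsOf chunks.length (List.replicate chunks.length true)
        = List.range chunks.length := idsOf_replicate_true chunks.length
    have habs0 : absOf chunks.length (List.replicate chunks.length true) chunks = chunks := by
      unfold absOf; rw [hids0]; exact map_getD_range chunks ""
    have hInv0 : InvB chunks.length (chunks.map PySem.Str.len) chunks
        ((List.range chunks.length).map
          (fun i : Nat => if 0 < i then some ((i : Int) - 1) else none))
        ((List.range chunks.length).map
          (fun i : Nat => if i < chunks.length - 1 then some ((i : Int) + 1) else none))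
        (List.replicate chunks.length true)
        ((List.range chunks.length).foldl
          (fun ag (i : Nat) => pushB ag (PySem.List.pyGetD (chunks.map PySem.Str.len) (i : Int) 0, (i : Int))) [])
        (chunks.length : Int) := by
      refine ⟨by simp, rfl, by simp, by simp, by simp, ?_, ?_, ?_, d1, ?_, ?_⟩
      · rw [hids0]; simp
      · intro i hi
        rw [hids0] at hi
        have hilt : i < chunks.length := List.mem_range.mp hi
        rw [getD_eq_getElem'' _ i _ (by simpa using hilt),
          getD_eq_getElem'' chunks i "" hilt]
        simp
      · rw [hids0]
        have := linked_init chunks.length chunks.length 0 (by omega)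
        rw [if_pos rfl, ← List.range_eq_range'] at this
        exact this
      · intro i hi
        rw [hids0] at hi
        exact d4 i hi
      · intro e he
        rcases d5 e he with h | h
        · simp at h
        · exact h
    have hfuel0 : ((List.range chunks.length).foldl
          (fun ag (i : Nat) => pushB ag (PySem.List.pyGetD (chunks.map PySem.Str.len) (i : Int) 0, (i : Int))) []).length
        + 2 * (idsOf chunks.length (List.replicate chunks.length true)).length
        ≤ 3 * chunks.length := by
      rw [d2, hids0]
      simp
      omega
    have hsim := B_sim min_chars chunks.length (3 * chunks.length)
      (chunks.map PySem.Str.len) chunks _ _ (List.replicate chunks.length true) _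
      (chunks.length : Int) hInv0 hfuel0
    rw [habs0, hids0, List.length_range] at hsim
    rw [A_eq_ideal, ← hsim]
    simp only [PySem.List.pyGetD_natCast]
    rfl
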